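-- pv_equiv track=rewrite | github.com/ShubhankarKapoor/stateestimation | ausnet_parser.py | get_ordered_arcs
-- ===== SOURCE A (Python) =====
-- def get_ordered_arcs(BusNum, arcs_all):
--     '''
--     Returns arcs in order
--     Returns ordered buses with the arcs connected with them
--     BusNum: topologically ordered nodes/buses
--     arcs_all: all the arcs in the network
--     '''
--     # bus_arcs[0] = {"To":[],"from":[(0,1)]}
--     # add to and then from for bus nodes in list of ordered arcs
--     arcs = [] # ordered arcs
--     bus_arcs = {} # ordered with busnodes
--
--     for i in BusNum: # use ordered bus
--         t = []
--         f = []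
--
--         for ii in arcs_all:
--             if i == ii[0]:
--                 f.append(ii)
--                 if ii not in arcs:
--                     arcs.append(ii)
--             if i == ii[1]:
--                 t.append(ii)
--                 if ii not in arcs:
--                     arcs.append(ii)
--         bus_arcs[i] = {"To":t,"from":f}
--     return arcs, bus_arcs
-- ===== SOURCE B (Python) =====
-- def get_ordered_arcs(BusNum, arcs_all):
--     # One pass over arcs_all builds node->arcs indexes; dedup via a hash set.
--     from_idx = {}
--     to_idx = {}
--     touch_idx = {}
--     for a in arcs_all:
--         from_idx.setdefault(a[0], []).append(a)
--         to_idx.setdefault(a[1], []).append(a)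
--         touch_idx.setdefault(a[0], []).append(a)
--         if a[1] != a[0]:
--             touch_idx.setdefault(a[1], []).append(a)
--     arcs = []
--     seen = set()
--     for i in BusNum:
--         for a in touch_idx.get(i, []):
--             if a not in seen:
--                 seen.add(a)
--                 arcs.append(a)
--     bus_arcs = {i: {"To": to_idx.get(i, []), "from": from_idx.get(i, [])} for i in BusNum}
--     return arcs, bus_arcs
-- ===== Notes on version B (the rewrite author's own statement) =====
-- stated objective: faster
-- what changed: Replaces A's per-bus rescan of arcs_all (with an O(A) 'not in arcs' list-membership dedup inside) by a single indexing pass building node->arc-list dicts (from/to/touching) and a hash-set dedup, then assembles the same ordered arc list and per-bus dict by direct lookups.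
import Mathlib
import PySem

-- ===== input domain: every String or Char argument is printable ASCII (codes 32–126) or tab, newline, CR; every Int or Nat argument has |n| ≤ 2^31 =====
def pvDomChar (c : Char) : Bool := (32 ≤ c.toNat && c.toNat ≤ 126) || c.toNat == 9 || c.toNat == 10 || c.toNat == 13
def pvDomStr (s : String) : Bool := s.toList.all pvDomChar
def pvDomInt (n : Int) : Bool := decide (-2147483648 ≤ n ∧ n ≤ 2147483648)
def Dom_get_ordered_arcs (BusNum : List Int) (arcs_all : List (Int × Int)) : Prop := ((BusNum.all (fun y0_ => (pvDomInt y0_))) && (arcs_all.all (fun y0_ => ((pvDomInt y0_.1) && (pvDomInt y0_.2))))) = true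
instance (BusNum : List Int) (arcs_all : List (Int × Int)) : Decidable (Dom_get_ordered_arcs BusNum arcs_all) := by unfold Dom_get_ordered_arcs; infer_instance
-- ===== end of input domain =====

-- B replaces A's per-bus rescans of arcs_all and list-membership dedup by one indexing pass
-- (node → arc-list dicts) plus a hash-set dedup: same return value, O(B+A) instead of O(B·A²).

-- ===== PORT A =====
-- 'if ii not in arcs: arcs.append(ii)'
def pvDedupPush (arcs : List (Int × Int)) (a : Int × Int) : List (Int × Int) :=
  if a ∈ arcs then arcs else arcs ++ [a]

-- body of A's inner 'for ii in arcs_all' loop; state s = (t, f, arcs)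
def pvAStep (i : Int) (s : List (Int × Int) × List (Int × Int) × List (Int × Int))
    (ii : Int × Int) : List (Int × Int) × List (Int × Int) × List (Int × Int) :=
  let s := if i = ii.1 then (s.1, s.2.1 ++ [ii], pvDedupPush s.2.2 ii) else s
  let s := if i = ii.2 then (s.1 ++ [ii], s.2.1, pvDedupPush s.2.2 ii) else s
  s

def get_ordered_arcs (BusNum : List Int) (arcs_all : List (Int × Int)) :
    (List (Int × Int)) × (List (Int × List (String × List (Int × Int)))) :=
  let res := BusNum.foldl
    (fun (st : List (Int × Int) × PySem.Dict Int (List (String × List (Int × Int)))) i =>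
      let inner := arcs_all.foldl (pvAStep i) ([], [], st.1)
      (inner.2.2, st.2.insert i [("To", inner.1), ("from", inner.2.1)]))
    ([], PySem.Dict.empty)
  (res.1, res.2.items)

-- ===== PORT B =====
-- one indexing pass: d = (from_idx, to_idx, touch_idx); setdefault(k, []).append(a) = modify k [] (· ++ [a])
def pvBIdxStep
    (d : PySem.Dict Int (List (Int × Int)) × PySem.Dict Int (List (Int × Int)) × PySem.Dict Int (List (Int × Int)))
    (a : Int × Int) :
    PySem.Dict Int (List (Int × Int)) × PySem.Dict Int (List (Int × Int)) × PySem.Dict Int (List (Int × Int)) :=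
  let fi := d.1.modify a.1 [] (· ++ [a])
  let ti := d.2.1.modify a.2 [] (· ++ [a])
  let tc := d.2.2.modify a.1 [] (· ++ [a])
  let tc := if a.2 ≠ a.1 then tc.modify a.2 [] (· ++ [a]) else tc
  (fi, ti, tc)

-- 'if a not in seen: seen.add(a); arcs.append(a)'; state st = (arcs, seen)
def pvBSeenStep (st : List (Int × Int) × PySem.Set (Int × Int)) (a : Int × Int) :
    List (Int × Int) × PySem.Set (Int × Int) :=
  if a ∈ st.2 then st else (st.1 ++ [a], PySem.Set.add st.2 a)

def get_ordered_arcs_alt (BusNum : List Int) (arcs_all : List (Int × Int)) :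
    (List (Int × Int)) × (List (Int × List (String × List (Int × Int)))) :=
  let idx := arcs_all.foldl pvBIdxStep (PySem.Dict.empty, PySem.Dict.empty, PySem.Dict.empty)
  let collected := BusNum.foldl (fun st i => (idx.2.2.getD i []).foldl pvBSeenStep st)
    ([], PySem.Set.empty)
  let bus_arcs := BusNum.foldl
    (fun (d : PySem.Dict Int (List (String × List (Int × Int)))) i =>
      d.insert i [("To", idx.2.1.getD i []), ("from", idx.1.getD i [])])
    PySem.Dict.empty
  (collected.1, bus_arcs.items)

-- ===== PRECONDITION & SPEC =====
def Spec_get_ordered_arcs (BusNum : List Int) (arcs_all : List (Int × Int)) (out : (List (Int × Int)) × (List (Int × List (String × List (Int × Int))))) : Prop := out = get_ordered_arcs_alt BusNum arcs_all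
instance (BusNum : List Int) (arcs_all : List (Int × Int)) (out : (List (Int × Int)) × (List (Int × List (String × List (Int × Int))))) : Decidable (Spec_get_ordered_arcs BusNum arcs_all out) := by unfold Spec_get_ordered_arcs; infer_instance

-- ===== CLAIM (what is proved, stated in full; the proofs are below) =====
def Claim_equal_get_ordered_arcs : Prop := ∀ (BusNum : List Int) (arcs_all : List (Int × Int)), Dom_get_ordered_arcs BusNum arcs_all → Spec_get_ordered_arcs BusNum arcs_all (get_ordered_arcs BusNum arcs_all)

-- ===== LEMMAS AND PROOFS =====

-- B's index fold componentwise: each of the three dicts is its own fold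
theorem pvIdx_split (l : List (Int × Int))
    (x y z : PySem.Dict Int (List (Int × Int))) :
    l.foldl pvBIdxStep (x, y, z) =
      (l.foldl (fun d a => d.modify a.1 [] (· ++ [a])) x,
       l.foldl (fun d a => d.modify a.2 [] (· ++ [a])) y,
       l.foldl (fun d a =>
         let tc := d.modify a.1 [] (· ++ [a])
         if a.2 ≠ a.1 then tc.modify a.2 [] (· ++ [a]) else tc) z) := by
  induction l generalizing x y z with
  | nil => rfl
  | cons a l ih => simp [List.foldl, pvBIdxStep, ih]

-- lookup in a modify-append fold over an arbitrary key projection = a filter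
theorem pvGetD_fold_key (k : Int × Int → Int) (l : List (Int × Int))
    (d : PySem.Dict Int (List (Int × Int))) (c : Int) :
    (l.foldl (fun d a => d.modify (k a) [] (· ++ [a])) d).getD c [] =
      d.getD c [] ++ l.filter (fun a => k a == c) := by
  induction l generalizing d with
  | nil => simp
  | cons a l ih =>
    simp only [List.foldl, ih, PySem.Dict.getD_modify, List.filter]
    by_cases h : c = k a
    · subst h; simp [List.append_assoc]
    · have h' : ¬ k a = c := fun e => h e.symm
      have hb : (k a == c) = false := by simpa using h'
      simp [h, hb]

-- lookup in B's touch-index fold = the arcs touching c, in arcs_all order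
theorem pvGetD_touch (l : List (Int × Int)) (d : PySem.Dict Int (List (Int × Int))) (c : Int) :
    (l.foldl (fun d a =>
        let tc := d.modify a.1 [] (· ++ [a])
        if a.2 ≠ a.1 then tc.modify a.2 [] (· ++ [a]) else tc) d).getD c [] =
      d.getD c [] ++ l.filter (fun a => a.1 == c || a.2 == c) := by
  induction l generalizing d with
  | nil => simp
  | cons a l ih =>
    simp only [List.foldl, ih, List.filter]
    by_cases h21 : a.2 = a.1
    · simp only [h21, ne_eq, not_true_eq_false, if_false, PySem.Dict.getD_modify]
      by_cases h1 : c = a.1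
      · subst h1; simp [List.append_assoc]
      · have hA : ¬ a.1 = c := fun e => h1 e.symm
        have hB : ¬ a.2 = c := by rw [h21]; exact hA
        have hb : (a.1 == c || a.2 == c) = false := by simp [hA, hB]
        have e1 : (a.1 == c) = false := by simpa using hA
        simp [h1, e1]
    · simp only [ne_eq, h21, not_false_eq_true, if_true, PySem.Dict.getD_modify]
      by_cases h1 : c = a.1
      · subst h1
        have h2 : ¬ a.1 = a.2 := fun e => h21 e.symm
        simp [h2, List.append_assoc]
      · by_cases h2 : c = a.2
        · subst h2
          have hA : ¬ a.1 = a.2 := fun e => h1 e.symm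
          simp [List.append_assoc]
        · have hA : ¬ a.1 = c := fun e => h1 e.symm
          have hB : ¬ a.2 = c := fun e => h2 e.symm
          have hb : (a.1 == c || a.2 == c) = false := by simp [hA, hB]
          have e1 : (a.1 == c) = false := by simpa using hA
          have e2 : (a.2 == c) = false := by simpa using hB
          simp [h1, h2, e1, e2]

theorem pvDedupPush_idem (arcs : List (Int × Int)) (a : Int × Int) :
    pvDedupPush (pvDedupPush arcs a) a = pvDedupPush arcs a := by
  by_cases h : a ∈ arcs
  · simp [pvDedupPush, h]
  · simp [pvDedupPush, h]

-- A's per-arc step in closed form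
theorem pvAStep_eq (i : Int) (s : List (Int × Int) × List (Int × Int) × List (Int × Int))
    (a : Int × Int) :
    pvAStep i s a =
      (if i = a.2 then s.1 ++ [a] else s.1,
       if i = a.1 then s.2.1 ++ [a] else s.2.1,
       if i = a.1 ∨ i = a.2 then pvDedupPush s.2.2 a else s.2.2) := by
  simp only [pvAStep]
  by_cases h1 : i = a.1 <;> by_cases h2 : i = a.2
  · simp [h1, h1.symm.trans h2, pvDedupPush_idem]
  · have e : ¬ a.1 = a.2 := fun e' => h2 (h1.trans e')
    simp [h1, e]
  · have e : ¬ a.2 = a.1 := fun e' => h1 (h2.trans e')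
    simp [h2, e]
  · simp [h1, h2]

-- A's inner loop: t and f are filters, arcs grows by dedup-pushing the touching arcs
theorem pvAInner (i : Int) (l : List (Int × Int)) (t f arcs : List (Int × Int)) :
    l.foldl (pvAStep i) (t, f, arcs) =
      (t ++ l.filter (fun a => a.2 == i),
       f ++ l.filter (fun a => a.1 == i),
       (l.filter (fun a => a.1 == i || a.2 == i)).foldl pvDedupPush arcs) := by
  induction l generalizing t f arcs with
  | nil => simp
  | cons a l ih =>
    simp only [List.foldl, pvAStep_eq, ih, List.filter]
    by_cases h1 : i = a.1 <;> by_cases h2 : i = a.2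
    · have e1 : (a.1 == i) = true := by simp [h1.symm]
      have e2 : (a.2 == i) = true := by simp [h2.symm]
      rw [if_pos h2, if_pos h1, if_pos (Or.inl h1)]
      simp [e1, e2, List.append_assoc]
    · have e1 : (a.1 == i) = true := by simp [h1.symm]
      have e2 : (a.2 == i) = false := by simpa using fun e => h2 e.symm
      rw [if_neg h2, if_pos h1, if_pos (Or.inl h1)]
      simp [e1, e2, List.append_assoc]
    · have e1 : (a.1 == i) = false := by simpa using fun e => h1 e.symm
      have e2 : (a.2 == i) = true := by simp [h2.symm]
      rw [if_pos h2, if_neg h1, if_pos (Or.inr h2)]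
      simp [e1, e2, List.append_assoc]
    · have e1 : (a.1 == i) = false := by simpa using fun e => h1 e.symm
      have e2 : (a.2 == i) = false := by simpa using fun e => h2 e.symm
      rw [if_neg h2, if_neg h1, if_neg (by tauto : ¬ (i = a.1 ∨ i = a.2))]
      simp [e1, e2]

-- B's seen-set loop computes the same list as A's 'not in arcs' dedup, and the set
-- keeps tracking exactly the membership of the list
theorem pvSeen (l : List (Int × Int)) (arcs : List (Int × Int)) (seen : PySem.Set (Int × Int))
    (h : ∀ x, x ∈ seen ↔ x ∈ arcs) :
    l.foldl pvBSeenStep (arcs, seen) =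
      (l.foldl pvDedupPush arcs, (l.foldl pvBSeenStep (arcs, seen)).2) ∧
    (∀ x, x ∈ (l.foldl pvBSeenStep (arcs, seen)).2 ↔ x ∈ l.foldl pvDedupPush arcs) := by
  induction l generalizing arcs seen with
  | nil => exact ⟨rfl, h⟩
  | cons a l ih =>
    simp only [List.foldl]
    by_cases hm : a ∈ seen
    · have ha : a ∈ arcs := (h a).mp hm
      have hs : pvBSeenStep (arcs, seen) a = (arcs, seen) := by simp [pvBSeenStep, hm]
      have hd : pvDedupPush arcs a = arcs := by simp [pvDedupPush, ha]
      rw [hs, hd]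
      exact ih arcs seen h
    · have ha : a ∉ arcs := fun hc => hm ((h a).mpr hc)
      have hs : pvBSeenStep (arcs, seen) a = (arcs ++ [a], PySem.Set.add seen a) := by
        simp [pvBSeenStep, hm]
      have hd : pvDedupPush arcs a = arcs ++ [a] := by simp [pvDedupPush, ha]
      rw [hs, hd]
      refine ih (arcs ++ [a]) (PySem.Set.add seen a) ?_
      intro x
      rw [PySem.Set.mem_add]
      simp [h x]

-- the whole of A's outer loop against B's two loops, with the seen/arcs invariant carried
theorem pvMain (bs : List Int) (tof frf tcf : Int → List (Int × Int))
    (arcs : List (Int × Int)) (seen : PySem.Set (Int × Int))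
    (d : PySem.Dict Int (List (String × List (Int × Int))))
    (h : ∀ x, x ∈ seen ↔ x ∈ arcs) :
    bs.foldl (fun st i =>
        ((tcf i).foldl pvDedupPush st.1, st.2.insert i [("To", tof i), ("from", frf i)]))
        (arcs, d) =
      ((bs.foldl (fun st i => (tcf i).foldl pvBSeenStep st) (arcs, seen)).1,
       bs.foldl (fun d i => d.insert i [("To", tof i), ("from", frf i)]) d) ∧
    (∀ x, x ∈ (bs.foldl (fun st i => (tcf i).foldl pvBSeenStep st) (arcs, seen)).2 ↔
        x ∈ (bs.foldl (fun st i => (tcf i).foldl pvBSeenStep st) (arcs, seen)).1) := by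
  induction bs generalizing arcs seen d with
  | nil => exact ⟨rfl, h⟩
  | cons i bs ih =>
    simp only [List.foldl]
    obtain ⟨he, hinv⟩ := pvSeen (tcf i) arcs seen h
    rw [he]
    exact ih ((tcf i).foldl pvDedupPush arcs)
      ((tcf i).foldl pvBSeenStep (arcs, seen)).2
      (d.insert i [("To", tof i), ("from", frf i)]) hinv

-- ===== VERDICT (by name: the statement is the Claim_ definition above) =====
theorem get_ordered_arcs_spec : Claim_equal_get_ordered_arcs := by
  intro BusNum arcs_all _
  show _ = _
  unfold get_ordered_arcs get_ordered_arcs_alt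
  simp only [pvIdx_split]
  have hstepA : ∀ (st : List (Int × Int) × PySem.Dict Int (List (String × List (Int × Int)))) (i : Int),
      (fun (st : List (Int × Int) × PySem.Dict Int (List (String × List (Int × Int)))) i =>
        let inner := arcs_all.foldl (pvAStep i) ([], [], st.1)
        (inner.2.2, st.2.insert i [("To", inner.1), ("from", inner.2.1)])) st i =
      ((arcs_all.filter (fun a => a.1 == i || a.2 == i)).foldl pvDedupPush st.1,
       st.2.insert i [("To", arcs_all.filter (fun a => a.2 == i)),
                      ("from", arcs_all.filter (fun a => a.1 == i))]) := by
    intro st i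
    simp [pvAInner]
  have hfunA : (fun (st : List (Int × Int) × PySem.Dict Int (List (String × List (Int × Int)))) i =>
        let inner := arcs_all.foldl (pvAStep i) ([], [], st.1)
        (inner.2.2, st.2.insert i [("To", inner.1), ("from", inner.2.1)])) =
      (fun st i =>
        ((arcs_all.filter (fun a => a.1 == i || a.2 == i)).foldl pvDedupPush st.1,
         st.2.insert i [("To", arcs_all.filter (fun a => a.2 == i)),
                        ("from", arcs_all.filter (fun a => a.1 == i))])) := by
    funext st i; exact hstepA st i
  rw [hfunA]
  have hto : ∀ i : Int,
      (arcs_all.foldl (fun d a => d.modify a.2 [] (· ++ [a])) PySem.Dict.empty).getD i [] =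
        arcs_all.filter (fun a => a.2 == i) := by
    intro i; rw [pvGetD_fold_key (fun a => a.2)]; simp
  have hfr : ∀ i : Int,
      (arcs_all.foldl (fun d a => d.modify a.1 [] (· ++ [a])) PySem.Dict.empty).getD i [] =
        arcs_all.filter (fun a => a.1 == i) := by
    intro i; rw [pvGetD_fold_key (fun a => a.1)]; simp
  have htc : ∀ i : Int,
      (arcs_all.foldl (fun d a =>
          let tc := d.modify a.1 [] (· ++ [a])
          if a.2 ≠ a.1 then tc.modify a.2 [] (· ++ [a]) else tc) PySem.Dict.empty).getD i [] =
        arcs_all.filter (fun a => a.1 == i || a.2 == i) := by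
    intro i; rw [pvGetD_touch]; simp
  simp only [hto, hfr, htc]
  obtain ⟨hmain, -⟩ := pvMain BusNum
    (fun i => arcs_all.filter (fun a => a.2 == i))
    (fun i => arcs_all.filter (fun a => a.1 == i))
    (fun i => arcs_all.filter (fun a => a.1 == i || a.2 == i))
    [] PySem.Set.empty PySem.Dict.empty (by simp [PySem.Set.empty])
  rw [hmain]
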